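-- pv_equiv track=rewrite | github.com/Joao-Fraiman/Listas-de-PC | lista-4/q1.py | cripto
-- ===== SOURCE A (Python) =====
-- def cripto(termo):
--   termo = termo.lower()
--   resultado = ''
--
--   for c in termo:
--     if c >= 'a' and c <= 'e':
--       resultado += '1'
--     elif c >= 'f' and c <= 'j':
--       resultado += '2'
--     elif c >= 'k' and c <= 'o':
--       resultado += '3'
--     elif c >= 'p' and c <= 'z':
--       resultado += '4'
--     else:
--       resultado += '5'
--
--   return resultado
-- ===== SOURCE B (Python) =====
-- def cripto(termo):
--     out = []
--     for c in termo.lower():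
--         if 'a' <= c <= 'z':
--             out.append(chr(ord('0') + min(3, (ord(c) - 97) // 5) + 1))
--         else:
--             out.append('5')
--     return ''.join(out)
-- ===== Notes on version B (the rewrite author's own statement) =====
-- stated objective: simpler
-- what changed: Replaces the four-branch range ladder by a single closed-form arithmetic group index min(3,(ord(c)-97)//5)+1 applied in a map-and-join instead of string concatenation in a loop.
import Mathlib
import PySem

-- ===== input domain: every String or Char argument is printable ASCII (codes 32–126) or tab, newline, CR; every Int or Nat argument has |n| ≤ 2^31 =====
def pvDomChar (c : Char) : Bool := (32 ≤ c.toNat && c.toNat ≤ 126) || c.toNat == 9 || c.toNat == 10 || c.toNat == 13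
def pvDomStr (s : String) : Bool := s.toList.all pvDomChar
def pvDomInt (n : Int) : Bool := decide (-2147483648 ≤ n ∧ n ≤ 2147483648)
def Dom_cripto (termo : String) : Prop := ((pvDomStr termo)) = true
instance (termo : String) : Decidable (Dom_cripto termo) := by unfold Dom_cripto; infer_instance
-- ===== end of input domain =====

-- B replaces A's four-branch range ladder by a closed-form arithmetic group index in a map-and-join (objective: simpler).


-- ===== PORT A =====
-- one loop iteration of A: the if/elif ladder appending one digit to resultado
def criptoStep (resultado : String) (c : Char) : String :=
  if 'a' ≤ c ∧ c ≤ 'e' then resultado ++ "1"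
  else if 'f' ≤ c ∧ c ≤ 'j' then resultado ++ "2"
  else if 'k' ≤ c ∧ c ≤ 'o' then resultado ++ "3"
  else if 'p' ≤ c ∧ c ≤ 'z' then resultado ++ "4"
  else resultado ++ "5"

def cripto (termo : String) : String :=
  (PySem.Str.lower termo).toList.foldl criptoStep ""

-- ===== PORT B =====
-- B's per-character closed form: chr(ord('0') + min(3, (ord(c) - 97) // 5) + 1), else '5'
def criptoDigit (c : Char) : Char :=
  if 'a' ≤ c ∧ c ≤ 'z' then Char.ofNat (48 + min 3 ((c.toNat - 97) / 5) + 1)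
  else '5'

def cripto_alt (termo : String) : String :=
  String.ofList ((PySem.Str.lower termo).toList.map criptoDigit)

-- ===== PRECONDITION & SPEC =====
def Spec_cripto (termo : String) (out : String) : Prop := out = cripto_alt termo
instance (termo : String) (out : String) : Decidable (Spec_cripto termo out) := by unfold Spec_cripto; infer_instance

-- ===== CLAIM (what is proved, stated in full; the proofs are below) =====
def Claim_equal_cripto : Prop := ∀ (termo : String), Dom_cripto termo → Spec_cripto termo (cripto termo)

-- ===== LEMMAS AND PROOFS =====

-- A's ladder step appends exactly B's closed-form digit
theorem criptoStep_eq (resultado : String) (c : Char) :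
    criptoStep resultado c = resultado ++ String.ofList [criptoDigit c] := by
  have hval : ∀ a b : Char, (a ≤ b) ↔ (a.toNat ≤ b.toNat) := by
    intro a b; rw [Char.le_def, UInt32.le_iff_toNat_le]; exact Iff.rfl
  unfold criptoStep criptoDigit
  simp only [hval, show ('a':Char).toNat = 97 from rfl, show ('e':Char).toNat = 101 from rfl,
    show ('f':Char).toNat = 102 from rfl, show ('j':Char).toNat = 106 from rfl,
    show ('k':Char).toNat = 107 from rfl, show ('o':Char).toNat = 111 from rfl,
    show ('p':Char).toNat = 112 from rfl, show ('z':Char).toNat = 122 from rfl]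
  split_ifs with h1 h2 h3 h4 h5 h6 h7 h8 h9
  · have hm : min 3 ((c.toNat - 97) / 5) = 0 := by omega
    rw [hm]
  · exfalso; omega
  · have hm : min 3 ((c.toNat - 97) / 5) = 1 := by omega
    rw [hm]
  · exfalso; omega
  · have hm : min 3 ((c.toNat - 97) / 5) = 2 := by omega
    rw [hm]
  · exfalso; omega
  · have hm : min 3 ((c.toNat - 97) / 5) = 3 := by omega
    rw [hm]
  · exfalso; omega
  · exfalso; omega
  · rfl

theorem cripto_foldl_eq (l : List Char) (res : String) :
    l.foldl criptoStep res = res ++ String.ofList (l.map criptoDigit) := by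
  induction l generalizing res with
  | nil => simp
  | cons c t ih =>
    simp only [List.foldl_cons, List.map_cons, ih, criptoStep_eq]
    rw [String.append_assoc]
    congr 1
    apply String.ext
    simp

-- ===== VERDICT (by name: the statement is the Claim_ definition above) =====
theorem cripto_spec : Claim_equal_cripto := by
  intro termo _
  unfold Spec_cripto cripto cripto_alt
  rw [cripto_foldl_eq]
  simp
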